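-- pv_equiv track=rewrite | github.com/br-kim/Programmers-Algorithm-Practice | python/Level2/방금그곡.py | make_full_music
-- ===== SOURCE A (Python) =====
-- def make_full_music(length, music):
--     full_music = []
--     idx = 0
--     while len(full_music) < length:
--         full_music.append(music[idx])
--         idx += 1
--         if idx == len(music):
--             idx = 0
--     return full_music
-- ===== SOURCE B (Python) =====
-- def make_full_music(length, music):
--     if length <= 0:
--         return []
--     k = -(-length // len(music))  # ceiling division: whole repetitions needed
--     return (music * k)[:length]
-- ===== Notes on version B (the rewrite author's own statement) =====
-- stated objective: simpler
-- what changed: Replaces the element-by-element while loop with a cycling index by one ceiling-division repetition of the whole list followed by a truncating slice.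
import Mathlib
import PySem

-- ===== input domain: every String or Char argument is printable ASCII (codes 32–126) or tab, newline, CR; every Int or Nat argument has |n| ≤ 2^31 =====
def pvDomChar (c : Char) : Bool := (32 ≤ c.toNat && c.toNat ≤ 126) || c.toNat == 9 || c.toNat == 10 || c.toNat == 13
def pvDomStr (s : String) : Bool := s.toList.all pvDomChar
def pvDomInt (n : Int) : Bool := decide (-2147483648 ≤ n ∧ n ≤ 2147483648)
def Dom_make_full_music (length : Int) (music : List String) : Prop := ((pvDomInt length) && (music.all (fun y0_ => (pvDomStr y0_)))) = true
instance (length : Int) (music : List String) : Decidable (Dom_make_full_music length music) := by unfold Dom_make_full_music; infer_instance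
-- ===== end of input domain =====

-- B replaces A's element-by-element while loop (cycling index) by repeating the whole list
-- a ceiling-division number of times and truncating with one slice; objective: simpler.

-- ===== PORT A =====
-- A's while loop appends one element per iteration until len(full_music) = length, so it runs
-- exactly max(length, 0) iterations; the fuel is that count. pyGet? none = Python's IndexError
-- on empty music (excluded by Pre_); the loop state (idx, accumulated list) is kept as in A.
def make_full_music_go (music : List String) (idx : Nat) : Nat → List String
  | 0 => []
  | n + 1 =>
    match PySem.List.pyGet? music (idx : Int) with
    | none => []  -- Python raises IndexError here; outside Pre_
    | some x => x :: make_full_music_go music (if idx + 1 = music.length then 0 else idx + 1) n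

def make_full_music (length : Int) (music : List String) : List String :=
  make_full_music_go music 0 length.toNat

-- ===== PORT B =====
def make_full_music_alt (length : Int) (music : List String) : List String :=
  if length ≤ 0 then []
  else
    let k : Int := -(PySem.Int.floordiv (-length) (music.length : Int))  -- ceiling division
    PySem.List.slice (List.flatten (List.replicate k.toNat music)) none (some length)

-- ===== PRECONDITION & SPEC =====
-- Pre_ excludes exactly the inputs where Python A raises IndexError (music = [] with length > 0);
-- B raises ZeroDivisionError there too.
def Pre_make_full_music (length : Int) (music : List String) : Prop :=
  music ≠ [] ∨ length ≤ 0
instance (length : Int) (music : List String) : Decidable (Pre_make_full_music length music) := by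
  unfold Pre_make_full_music; infer_instance

def pvWitness_make_full_music : Int × List String := (5, ["A", "B#", "C"])

def Spec_make_full_music (length : Int) (music : List String) (out : List String) : Prop := out = make_full_music_alt length music
instance (length : Int) (music : List String) (out : List String) : Decidable (Spec_make_full_music length music out) := by unfold Spec_make_full_music; infer_instance

-- ===== CLAIM (what is proved, stated in full; the proofs are below) =====
def Claim_equal_make_full_music : Prop := ∀ (length : Int) (music : List String), Dom_make_full_music length music → Pre_make_full_music length music → Spec_make_full_music length music (make_full_music length music)

-- ===== LEMMAS AND PROOFS =====

-- length of m copies of music, flattened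
theorem mfm_flat_len (music : List String) (m : Nat) :
    ((List.replicate m music).flatten).length = m * music.length := by
  simp [List.length_flatten]

-- taking j ≤ m·|music| elements ignores one extra appended copy
theorem mfm_step (music : List String) (j m : Nat) (h : j ≤ m * music.length) :
    ((List.replicate (m + 1) music).flatten).take j = ((List.replicate m music).flatten).take j := by
  rw [List.replicate_succ', List.flatten_append]
  simp only [List.flatten_cons, List.flatten_nil, List.append_nil]
  exact List.take_append_of_le_length (by rw [mfm_flat_len]; exact h)

-- taking j ≤ m·|music| elements is the same from any m' ≥ m copies
theorem mfm_many (music : List String) (j m m' : Nat) (h : j ≤ m * music.length) (hmm : m ≤ m') :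
    ((List.replicate m' music).flatten).take j = ((List.replicate m music).flatten).take j := by
  induction m', hmm using Nat.le_induction with
  | base => rfl
  | succ m' hm' ih =>
      rw [← ih]
      exact mfm_step music j m' (le_trans h (Nat.mul_le_mul_right _ hm'))

-- A's loop from position idx produces the first n elements of the cycle starting at idx
theorem mfm_go_eq (music : List String) (n : Nat) :
    ∀ idx : Nat, idx < music.length →
      make_full_music_go music idx n
        = (music.drop idx ++ (List.replicate n music).flatten).take n := by
  induction n with
  | zero => intro idx _; simp [make_full_music_go]
  | succ n ih =>
      intro idx hidx
      have hget : PySem.List.pyGet? music (idx : Int) = some music[idx] := by simp [pysem, hidx]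
      simp only [make_full_music_go, hget]
      rw [List.drop_eq_getElem_cons hidx, List.cons_append, List.take_succ_cons]
      by_cases hwrap : idx + 1 = music.length
      · have hL : 0 < music.length := by omega
        rw [if_pos hwrap, ih 0 hL]
        rw [hwrap, List.drop_length, List.nil_append, List.drop_zero]
        rw [List.replicate_succ, List.flatten_cons]
      · have hidx' : idx + 1 < music.length := by omega
        rw [if_neg hwrap, ih (idx + 1) hidx']
        rw [List.take_append, List.take_append]
        have hL : 1 ≤ music.length := by omega
        rw [mfm_many music (n - (List.drop (idx + 1) music).length) n (n + 1)
          (le_trans (Nat.sub_le _ _) (Nat.le_mul_of_pos_right n hL)) (Nat.le_succ n)]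

-- ===== VERDICT (by name: the statement is the Claim_ definition above) =====
theorem make_full_music_spec : Claim_equal_make_full_music := by
  intro length music _ hpre
  unfold Spec_make_full_music make_full_music make_full_music_alt
  by_cases hle : length ≤ 0
  · rw [if_pos hle]
    have : length.toNat = 0 := by omega
    rw [this]; rfl
  · rw [if_neg hle]
    show make_full_music_go music 0 length.toNat
        = PySem.List.slice
            ((List.replicate (-(PySem.Int.floordiv (-length) (music.length : Int))).toNat music).flatten)
            none (some length)
    have hpos : 0 < length := by omega
    have hmus : music ≠ [] := by
      rcases hpre with h | h
      · exact h
      · omega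
    have hL : 0 < music.length := List.length_pos_of_ne_nil hmus
    have hLZ : (0 : Int) < (music.length : Int) := by exact_mod_cast hL
    set k : Int := -(PySem.Int.floordiv (-length) (music.length : Int)) with hk
    have hceil : (k - 1) * (music.length : Int) < length ∧ length ≤ k * (music.length : Int) := by
      rw [← PySem.Int.neg_floordiv_neg_eq_iff_of_pos hLZ]
    have hkpos : 0 < k := by
      by_contra hknp
      push Not at hknp
      have : k * (music.length : Int) ≤ 0 := mul_nonpos_of_nonpos_of_nonneg hknp (le_of_lt hLZ)
      omega
    set n : Nat := length.toNat with hn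
    have hnk : n ≤ k.toNat * music.length := by
      have : (n : Int) ≤ ((k.toNat * music.length : Nat) : Int) := by
        push_cast
        rw [Int.toNat_of_nonneg (le_of_lt hkpos)]
        omega
      exact_mod_cast this
    rw [PySem.List.slice_to _ (le_of_lt hpos)]
    rw [mfm_go_eq music n 0 hL, List.drop_zero]
    have h1 : music ++ (List.replicate n music).flatten
        = (List.replicate (n + 1) music).flatten := by
      rw [List.replicate_succ, List.flatten_cons]
    rw [h1, ← hn]
    have hn1 : n ≤ (n + 1) * music.length := le_trans (Nat.le_succ n)
      (Nat.le_mul_of_pos_right (n + 1) hL)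
    calc ((List.replicate (n + 1) music).flatten).take n
        = ((List.replicate (max (n + 1) k.toNat) music).flatten).take n :=
          (mfm_many music n (n + 1) _ hn1 (le_max_left _ _)).symm
      _ = ((List.replicate k.toNat music).flatten).take n :=
          mfm_many music n k.toNat _ hnk (le_max_right _ _)
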